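-- pv_equiv track=rewrite | github.com/Set4now/DSAlgo | array/arr.py | get_subarr_slice
-- ===== SOURCE A (Python) =====
-- def get_subarr_slice(arr, left, right):
--     # O n ^ 2
--     final = []
--     result = []
--     for i in range(len(arr)):
--         for j in range(i+1, len(arr) + 1):
--             sub = arr[i:j]
--             final.append(sub)
--     for arr in final:
--         if right >= max(arr) >= left:
--             result.append(arr)
--
--     return len(result)
-- ===== SOURCE B (Python) =====
-- def get_subarr_slice(arr, left, right):
--     # O(n): subarrays with max in [left, right] = (# with max <= right) - (# with max <= min(left-1, right)),
--     # counted per end index via run lengths of elements below each threshold.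
--     lo = min(left - 1, right)
--     ans = r = l = 0
--     for x in arr:
--         r = r + 1 if x <= right else 0
--         l = l + 1 if x <= lo else 0
--         ans += r - l
--     return ans
-- ===== Notes on version B (the rewrite author's own statement) =====
-- stated objective: faster
-- what changed: Replaces the O(n^3) enumeration of all subarray slices with max() over each by a single O(n) pass counting, per end index, the run lengths of elements <= right and <= min(left-1,right) and summing their difference.
import Mathlib
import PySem

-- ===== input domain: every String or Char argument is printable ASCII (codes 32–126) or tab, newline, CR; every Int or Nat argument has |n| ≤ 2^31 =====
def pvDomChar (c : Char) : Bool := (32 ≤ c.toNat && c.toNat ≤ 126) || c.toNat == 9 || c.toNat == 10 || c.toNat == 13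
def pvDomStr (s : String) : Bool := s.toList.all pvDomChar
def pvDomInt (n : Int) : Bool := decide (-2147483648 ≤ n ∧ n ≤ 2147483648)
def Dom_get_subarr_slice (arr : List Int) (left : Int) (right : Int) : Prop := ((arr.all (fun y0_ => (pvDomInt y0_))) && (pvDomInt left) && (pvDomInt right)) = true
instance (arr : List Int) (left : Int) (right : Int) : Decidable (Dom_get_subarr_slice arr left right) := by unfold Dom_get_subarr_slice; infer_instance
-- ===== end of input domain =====

-- B replaces A's O(n^3) enumeration of every subarray slice (taking max() of each) by one O(n) pass
-- summing, per end index, the difference of run lengths of elements ≤ right and ≤ min(left-1, right).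

-- ===== PORT A =====
-- 'right >= max(arr) >= left' of the second loop; max([]) would raise in Python, but every
-- slice arr[i:j] appended has i < j so it is nonempty and the none branch is unreachable.
def pvMaxOk (left right : Int) (a : List Int) : Bool :=
  match PySem.List.max? a (fun y => y) with
  | some m => decide (right ≥ m ∧ m ≥ left)
  | none => false

def get_subarr_slice (arr : List Int) (left : Int) (right : Int) : Int :=
  let n : Int := arr.length
  let final := (PySem.List.pyRange 0 n 1).foldl
    (fun f i => (PySem.List.pyRange (i+1) (n+1) 1).foldl
      (fun f2 j => f2 ++ [PySem.List.slice arr (some i) (some j)]) f) ([] : List (List Int))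
  let result := final.foldl
    (fun res a => if pvMaxOk left right a then res ++ [a] else res) ([] : List (List Int))
  (result.length : Int)

-- ===== PORT B =====
def get_subarr_slice_alt (arr : List Int) (left : Int) (right : Int) : Int :=
  let lo := min (left - 1) right
  let s := arr.foldl (fun (s : Int × Int × Int) x =>
    let r := if x ≤ right then s.2.1 + 1 else 0
    let l := if x ≤ lo then s.2.2 + 1 else 0
    (s.1 + (r - l), r, l)) (0, 0, 0)
  s.1

-- ===== PRECONDITION & SPEC =====
def Spec_get_subarr_slice (arr : List Int) (left : Int) (right : Int) (out : Int) : Prop := out = get_subarr_slice_alt arr left right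
instance (arr : List Int) (left : Int) (right : Int) (out : Int) : Decidable (Spec_get_subarr_slice arr left right out) := by unfold Spec_get_subarr_slice; infer_instance

-- ===== CLAIM (what is proved, stated in full; the proofs are below) =====
def Claim_equal_get_subarr_slice : Prop := ∀ (arr : List Int) (left : Int) (right : Int), Dom_get_subarr_slice arr left right → Spec_get_subarr_slice arr left right (get_subarr_slice arr left right)

-- ===== LEMMAS AND PROOFS =====
def pvCnt (t : Int) (q : List Int) : Nat :=
  (List.range q.length).countP (fun i => (q.drop i).all (fun y => decide (y ≤ t)))

lemma pvCnt_snoc (t x : Int) (p : List Int) :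
    pvCnt t (p ++ [x]) = if x ≤ t then pvCnt t p + 1 else 0 := by
  unfold pvCnt
  simp only [List.length_append, List.length_cons, List.length_nil, Nat.zero_add,
    List.range_succ, List.countP_append]
  by_cases hx : x ≤ t
  · simp only [hx, if_pos]
    have h1 : (List.range p.length).countP
        (fun i => ((p ++ [x]).drop i).all (fun y => decide (y ≤ t))) =
        (List.range p.length).countP (fun i => (p.drop i).all (fun y => decide (y ≤ t))) := by
      apply List.countP_congr
      intro i hi
      rw [List.mem_range] at hi
      rw [List.drop_append_of_le_length (by omega)]
      simp [hx]
    have h2 : (p ++ [x]).drop p.length = [x] := by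
      rw [List.drop_append_of_le_length (by omega)]; simp
    simp [h1, h2, hx]
  · simp only [hx, if_false]
    have h1 : (List.range p.length).countP
        (fun i => ((p ++ [x]).drop i).all (fun y => decide (y ≤ t))) = 0 := by
      rw [List.countP_eq_zero]
      intro i hi
      rw [List.mem_range] at hi
      rw [List.drop_append_of_le_length (by omega)]
      simp [hx]
    have h2 : (p ++ [x]).drop p.length = [x] := by
      rw [List.drop_append_of_le_length (by omega)]; simp
    simp [h1, h2, hx]


lemma pvCountP_sub {α : Type} (l : List α) (Q R : α → Bool) (h : ∀ a ∈ l, R a = true → Q a = true) :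
    ((l.countP fun a => Q a && !R a) : Int) = l.countP Q - l.countP R := by
  induction l with
  | nil => simp
  | cons a l ih =>
    have ha := h a (by simp)
    have ih' := ih (fun b hb hrb => h b (by simp [hb]) hrb)
    rcases (Q a).eq_false_or_eq_true with hQ | hQ <;>
      rcases (R a).eq_false_or_eq_true with hR | hR
    · simp [List.countP_cons, hQ, hR]
      push_cast
      linarith [ih']
    · simp [List.countP_cons, hQ, hR]
      push_cast
      linarith [ih']
    · exact absurd (ha hR) (by simp [hQ])
    · simp [List.countP_cons, hQ, hR]
      push_cast
      linarith [ih']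

lemma pvMaxOk_char (left right : Int) (q : List Int) (hq : q ≠ []) :
    pvMaxOk left right q =
      ((q.all fun y => decide (y ≤ right)) && !(q.all fun y => decide (y ≤ min (left-1) right))) := by
  obtain ⟨m, hm⟩ : ∃ m, PySem.List.max? q (fun y => y) = some m := by
    cases h : PySem.List.max? q (fun y => y) with
    | none => exact absurd ((PySem.List.max?_eq_none_iff q _).mp h) hq
    | some m => exact ⟨m, rfl⟩
  have hmem := PySem.List.max?_mem hm
  have hmax := PySem.List.max?_isMax hm
  simp only [pvMaxOk, hm]
  rw [Bool.eq_iff_iff]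
  simp only [decide_eq_true_eq, Bool.and_eq_true, Bool.not_eq_true', List.all_eq_true,
    List.all_eq_false, decide_eq_true_eq]
  constructor
  · rintro ⟨h1, h2⟩
    refine ⟨fun y hy => le_trans (hmax y hy) h1, ⟨m, hmem, by simp; omega⟩⟩
  · rintro ⟨h1, ⟨y, hy, hy2⟩⟩
    have hym := hmax y hy
    have hmr := h1 m hmem
    simp at hy2
    omega

lemma pvE_eq (left right : Int) (q : List Int) :
    (((List.range q.length).countP (fun i => pvMaxOk left right (q.drop i))) : Int)
      = pvCnt right q - pvCnt (min (left-1) right) q := by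
  unfold pvCnt
  rw [← pvCountP_sub]
  · congr 1
    apply List.countP_congr
    intro i hi
    rw [List.mem_range] at hi
    rw [pvMaxOk_char left right _ (by rw [Ne, List.drop_eq_nil_iff]; omega)]
  · intro i hi hR
    rw [List.mem_range] at hi
    simp only [List.all_eq_true, decide_eq_true_iff] at *
    intro y hy
    have := hR y hy
    omega

def pvPairs (left right : Int) (p : List Int) : Nat :=
  ((List.range p.length).map (fun i =>
    (List.range (p.length - i)).countP (fun k => pvMaxOk left right ((p.drop i).take (k+1))))).sum

def pvNI (left right : Int) (p : List Int) : Int :=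
  ((List.range p.length).map (fun j =>
    (pvCnt right (p.take (j+1)) : Int) - pvCnt (min (left-1) right) (p.take (j+1)))).sum

lemma pvSum_ite (l : List Nat) (p : Nat → Bool) :
    (l.map (fun i => if p i then 1 else 0)).sum = l.countP p := by
  induction l with
  | nil => simp
  | cons a l ih => simp [List.countP_cons, ih, Nat.add_comm]

lemma pvNI_snoc (left right : Int) (p : List Int) (x : Int) :
    pvNI left right (p ++ [x]) = pvNI left right p +
      ((pvCnt right (p ++ [x]) : Int) - pvCnt (min (left-1) right) (p ++ [x])) := by
  unfold pvNI
  rw [List.length_append]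
  simp only [List.length_cons, List.length_nil, Nat.zero_add, List.range_succ,
    List.map_append, List.sum_append]
  have hmap : (List.range p.length).map (fun j =>
      (pvCnt right ((p ++ [x]).take (j+1)) : Int) - pvCnt (min (left-1) right) ((p ++ [x]).take (j+1)))
      = (List.range p.length).map (fun j =>
      (pvCnt right (p.take (j+1)) : Int) - pvCnt (min (left-1) right) (p.take (j+1))) := by
    apply List.map_congr_left
    intro j hj
    rw [List.mem_range] at hj
    rw [List.take_append_of_le_length (by omega)]
  have hlast : (p ++ [x]).take (p.length + 1) = p ++ [x] :=
    List.take_of_length_le (by simp)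
  rw [hmap]
  simp [hlast]

lemma pvPairs_snoc (left right : Int) (p : List Int) (x : Int) :
    pvPairs left right (p ++ [x]) = pvPairs left right p +
      (List.range (p.length + 1)).countP (fun i => pvMaxOk left right ((p ++ [x]).drop i)) := by
  unfold pvPairs
  rw [List.length_append]
  simp only [List.length_cons, List.length_nil, Nat.zero_add, List.range_succ,
    List.map_append, List.sum_append, List.countP_append]
  have hdl : (p ++ [x]).drop p.length = [x] := by
    rw [List.drop_append_of_le_length (by omega)]; simp
  have hmap : (List.range p.length).map (fun i => (List.range (p.length + 1 - i)).countP
        (fun k => pvMaxOk left right (((p ++ [x]).drop i).take (k+1))))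
      = (List.range p.length).map (fun i =>
          (List.range (p.length - i)).countP (fun k => pvMaxOk left right ((p.drop i).take (k+1)))
          + (if pvMaxOk left right ((p ++ [x]).drop i) then 1 else 0)) := by
    apply List.map_congr_left
    intro i hi
    rw [List.mem_range] at hi
    have hdi : (p ++ [x]).drop i = p.drop i ++ [x] := List.drop_append_of_le_length (by omega)
    have hsplit : p.length + 1 - i = (p.length - i) + 1 := by omega
    rw [hdi, hsplit, List.range_succ, List.countP_append]
    congr 1
    · apply List.countP_congr
      intro k hk
      rw [List.mem_range] at hk
      rw [List.take_append_of_le_length (by simp; omega)]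
    · have htk : (p.drop i ++ [x]).take (p.length - i + 1) = p.drop i ++ [x] :=
        List.take_of_length_le (by simp)
      simp [htk]
  rw [hmap, List.sum_map_add, pvSum_ite]
  have hlast : ((List.range 1).countP
      (fun k => pvMaxOk left right (((p ++ [x]).drop p.length).take (k+1))))
      = (if pvMaxOk left right ((p ++ [x]).drop p.length) then 1 else 0) := by
    have : ((p ++ [x]).drop p.length).take 1 = (p ++ [x]).drop p.length := by
      rw [hdl]; simp
    simp [List.range_succ, this]
  simp only [Nat.add_sub_cancel_left, List.map_cons, List.map_nil, List.sum_cons,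
    List.sum_nil, List.countP_cons, List.countP_nil]
  omega

lemma pvB_inv (left right : Int) (p : List Int) :
    p.foldl (fun (s : Int × Int × Int) x =>
      let r := if x ≤ right then s.2.1 + 1 else 0
      let l := if x ≤ min (left - 1) right then s.2.2 + 1 else 0
      (s.1 + (r - l), r, l)) (0, 0, 0)
    = (pvNI left right p, (pvCnt right p : Int), (pvCnt (min (left-1) right) p : Int)) := by
  induction p using List.reverseRecOn with
  | nil => simp [pvNI, pvCnt]
  | append_singleton p x ih =>
    rw [List.foldl_append, ih]
    simp only [List.foldl_cons, List.foldl_nil]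
    rw [pvNI_snoc, pvCnt_snoc, pvCnt_snoc]
    by_cases h1 : x ≤ right <;> by_cases h2 : x ≤ min (left - 1) right
    · simp [h1, h2]; try (push_cast; ring)
    · simp [h1, h2]; try (push_cast; ring)
    · exact absurd (le_trans h2 (min_le_right _ _)) h1
    · simp [h1, h2]; try (push_cast; ring)

lemma pvMain (left right : Int) (arr : List Int) :
    (pvPairs left right arr : Int) = pvNI left right arr := by
  induction arr using List.reverseRecOn with
  | nil => simp [pvPairs, pvNI]
  | append_singleton p x ih =>
    rw [pvPairs_snoc, pvNI_snoc]
    push_cast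
    rw [ih]
    have := pvE_eq left right (p ++ [x])
    simp only [List.length_append, List.length_cons, List.length_nil, Nat.zero_add] at this
    rw [← this]
    try (push_cast; ring)

lemma pvA_eq (left right : Int) (arr : List Int) :
    get_subarr_slice arr left right = (pvPairs left right arr : Int) := by
  simp only [get_subarr_slice]
  rw [PySem.List.foldl_append_if (pvMaxOk left right) (fun a => a)]
  simp only [List.nil_append, List.length_map, ← List.countP_eq_length_filter]
  simp only [PySem.List.foldl_append_singleton_eq_map, PySem.List.foldl_append_eq_flatMap,
    List.nil_append]
  rw [List.countP_flatMap]
  congr 1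
  unfold pvPairs
  rw [PySem.List.pyRange_one 0 (arr.length : Int)]
  simp only [Int.sub_zero, Int.toNat_natCast, List.map_map]
  apply congrArg
  apply List.map_congr_left
  intro i hi
  rw [List.mem_range] at hi
  simp only [Function.comp_apply, Int.zero_add]
  rw [PySem.List.pyRange_one ((i : Int) + 1) ((arr.length : Int) + 1)]
  rw [List.countP_map]
  have hn : (((arr.length : Int) + 1) - ((i : Int) + 1)).toNat = arr.length - i := by omega
  rw [hn]
  rw [List.countP_map]
  apply List.countP_congr
  intro k hk
  rw [List.mem_range] at hk
  simp only [Function.comp_apply]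
  have hb : ((i : Int) + 1 + (k : Int)) = ((i + 1 + k : Nat) : Int) := by push_cast; ring
  rw [hb, PySem.List.slice_natCast]
  have : (i + 1 + k) - i = k + 1 := by omega
  rw [this]


lemma pvB_eq (left right : Int) (arr : List Int) :
    get_subarr_slice_alt arr left right = pvNI left right arr := by
  simp only [get_subarr_slice_alt]
  rw [pvB_inv]

-- ===== VERDICT (by name: the statement is the Claim_ definition above) =====
theorem get_subarr_slice_spec : Claim_equal_get_subarr_slice := by
  intro arr left right _
  unfold Spec_get_subarr_slice
  rw [pvA_eq, pvB_eq, pvMain]
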